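-- pv_equiv track=rewrite | github.com/cj81499/advent-of-code | src/aoc_cj/aoc2015/day25.py | code_at
-- ===== SOURCE A (Python) =====
-- FIRST_CODE = 20151125
--
-- def next_code(code: int) -> int:
--     return (code * 252533) % 33554393
--
-- def code_at(col: int, row: int) -> int:
--     code = FIRST_CODE
--     x, y = 1, 1
--
--     while not (x == col and y == row):
--         code = next_code(code)
--         if y == 1:
--             x, y = 1, x + 1
--         else:
--             x, y = x + 1, y - 1
--     return code
-- ===== SOURCE B (Python) =====
-- FIRST_CODE = 20151125
--
--
-- def code_at(col: int, row: int) -> int: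
--     # position (col,row) is the n-th code (0-based) in diagonal order
--     n = (col + row - 2) * (col + row - 1) // 2 + (col - 1)
--     return (FIRST_CODE * pow(252533, n, 33554393)) % 33554393
-- ===== Notes on version B (the rewrite author's own statement) =====
-- stated objective: faster
-- what changed: Replaces the step-by-step diagonal walk with the closed-form triangular index of (col,row) and one modular exponentiation via pow(b,e,m); Pre_ excludes col < 1 or row < 1, where A's while-loop never reaches its target and diverges.
import Mathlib
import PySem

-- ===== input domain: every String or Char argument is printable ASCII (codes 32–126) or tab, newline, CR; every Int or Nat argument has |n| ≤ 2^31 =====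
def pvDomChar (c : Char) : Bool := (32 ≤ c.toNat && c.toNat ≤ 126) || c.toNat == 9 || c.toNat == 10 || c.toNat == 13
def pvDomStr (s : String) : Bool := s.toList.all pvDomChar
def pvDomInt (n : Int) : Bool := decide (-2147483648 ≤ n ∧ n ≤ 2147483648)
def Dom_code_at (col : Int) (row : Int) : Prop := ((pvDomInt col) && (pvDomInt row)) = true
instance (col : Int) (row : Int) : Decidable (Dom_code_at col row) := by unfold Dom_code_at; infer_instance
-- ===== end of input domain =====

-- B replaces A's step-by-step diagonal walk by the closed-form triangular index
-- plus modular exponentiation (pow(b, e, m)); equivalence on col ≥ 1 ∧ row ≥ 1.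

-- ===== PORT A =====
def nextCode (code : Int) : Int := PySem.Int.mod (code * 252533) 33554393

-- A's 'while not (x == col and y == row)' loop; the Nat fuel only totalises it
-- (under Pre_ it is large enough to reach the target, proved below).
def codeLoop (col row : Int) : Int → Int → Int → Nat → Int
  | code, _, _, 0 => code
  | code, x, y, Nat.succ f =>
    if x = col ∧ y = row then code
    else
      let code' := nextCode code
      if y = 1 then codeLoop col row code' 1 (x + 1) f
      else codeLoop col row code' (x + 1) (y - 1) f

def code_at (col : Int) (row : Int) : Int :=
  codeLoop col row 20151125 1 1 ((col + row).toNat * (col + row).toNat)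

-- ===== PORT B =====
def code_at_alt (col : Int) (row : Int) : Int :=
  let n : Int := PySem.Int.floordiv ((col + row - 2) * (col + row - 1)) 2 + (col - 1)
  PySem.Int.mod (20151125 * PySem.Int.powMod 252533 n.toNat 33554393) 33554393

-- ===== PRECONDITION & SPEC =====
-- Pre_ excludes col < 1 or row < 1: A's walk visits only positions with
-- coordinates ≥ 1, so on those inputs its while-loop never terminates.
def Pre_code_at (col : Int) (row : Int) : Prop := 1 ≤ col ∧ 1 ≤ row
instance (col : Int) (row : Int) : Decidable (Pre_code_at col row) := by
  unfold Pre_code_at; infer_instance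

def pvWitness_code_at : Int × Int := (3, 4)

def Spec_code_at (col : Int) (row : Int) (out : Int) : Prop := out = code_at_alt col row
instance (col : Int) (row : Int) (out : Int) : Decidable (Spec_code_at col row out) := by
  unfold Spec_code_at; infer_instance

-- ===== CLAIM (what is proved, stated in full; the proofs are below) =====
def Claim_equal_code_at : Prop :=
  ∀ (col : Int) (row : Int), Dom_code_at col row → Pre_code_at col row →
    Spec_code_at col row (code_at col row)

-- ===== LEMMAS AND PROOFS =====

-- position step of A's walk and the (doubled) linear index of a position
def stepPos (p : Int × Int) : Int × Int :=
  if p.2 = 1 then (1, p.1 + 1) else (p.1 + 1, p.2 - 1)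

def idx2 (p : Int × Int) : Int := (p.1 + p.2 - 2) * (p.1 + p.2 - 1) + 2 * (p.1 - 1)

theorem stepPos_ge (p : Int × Int) (hx : 1 ≤ p.1) (hy : 1 ≤ p.2) :
    1 ≤ (stepPos p).1 ∧ 1 ≤ (stepPos p).2 := by
  unfold stepPos; split <;> constructor <;> simp <;> omega

theorem idx2_stepPos (p : Int × Int) (hx : 1 ≤ p.1) (hy : 1 ≤ p.2) :
    idx2 (stepPos p) = idx2 p + 2 := by
  obtain ⟨x, y⟩ := p
  unfold stepPos idx2
  by_cases h : y = 1 <;> simp [h] <;> ring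

theorem iterate_facts (k : Nat) (p : Int × Int) (hx : 1 ≤ p.1) (hy : 1 ≤ p.2) :
    1 ≤ (stepPos^[k] p).1 ∧ 1 ≤ (stepPos^[k] p).2 ∧
      idx2 (stepPos^[k] p) = idx2 p + 2 * k := by
  induction k generalizing p with
  | zero => simp [hx, hy]
  | succ k ih =>
    rw [Function.iterate_succ_apply]
    obtain ⟨h1, h2⟩ := stepPos_ge p hx hy
    obtain ⟨a, b, c⟩ := ih (stepPos p) h1 h2
    refine ⟨a, b, ?_⟩
    rw [c, idx2_stepPos p hx hy]
    push_cast; ring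

theorem loop_sim (col row : Int) (k : Nat) :
    ∀ (fuel : Nat) (code x y : Int), k ≤ fuel → 1 ≤ x → 1 ≤ y →
      stepPos^[k] (x, y) = (col, row) →
      codeLoop col row code x y fuel = nextCode^[k] code := by
  induction k with
  | zero =>
    intro fuel code x y _ _ _ hit
    simp only [Function.iterate_zero, id] at hit
    cases fuel with
    | zero => rfl
    | succ f =>
      have : x = col ∧ y = row := by
        constructor <;> [exact congrArg Prod.fst hit; exact congrArg Prod.snd hit]
      simp [codeLoop, this]
  | succ k ih =>
    intro fuel code x y hle hx hy hit
    cases fuel with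
    | zero => omega
    | succ f =>
      have hne : ¬(x = col ∧ y = row) := by
        rintro ⟨rfl, rfl⟩
        have := (iterate_facts (k + 1) (x, y) hx hy).2.2
        rw [hit] at this
        omega
      have hstep : stepPos^[k] (stepPos (x, y)) = (col, row) := by
        rw [← Function.iterate_succ_apply]; exact hit
      by_cases hy1 : y = 1
      · subst hy1
        have hsp : stepPos (x, (1 : Int)) = (1, x + 1) := by simp [stepPos]
        rw [hsp] at hstep
        have hun : codeLoop col row code x 1 (f + 1) =
            codeLoop col row (nextCode code) 1 (x + 1) f := by
          simp [codeLoop, hne]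
        rw [hun, ih f (nextCode code) 1 (x + 1) (by omega) (by norm_num) (by omega) hstep,
          ← Function.iterate_succ_apply]
      · have hsp : stepPos (x, y) = (x + 1, y - 1) := by simp [stepPos, hy1]
        rw [hsp] at hstep
        have hun : codeLoop col row code x y (f + 1) =
            codeLoop col row (nextCode code) (x + 1) (y - 1) f := by
          simp [codeLoop, hne, hy1]
        rw [hun, ih f (nextCode code) (x + 1) (y - 1) (by omega) (by omega) (by omega) hstep,
          ← Function.iterate_succ_apply]

theorem emod_mul_absorb (a b m : Int) : (a % m * b) % m = a * b % m := by
  conv_rhs => rw [Int.mul_emod]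
  rw [Int.mul_emod, Int.emod_emod_of_dvd _ dvd_rfl]

theorem emod_mul_absorb' (a b m : Int) : (a * (b % m)) % m = a * b % m := by
  conv_rhs => rw [Int.mul_emod]
  rw [Int.mul_emod, Int.emod_emod_of_dvd _ dvd_rfl]

theorem closed_form (k : Nat) :
    nextCode^[k] 20151125 = (20151125 * 252533 ^ k) % 33554393 := by
  induction k with
  | zero => norm_num
  | succ k ih =>
    rw [Function.iterate_succ_apply', ih]
    unfold nextCode
    rw [PySem.Int.mod_eq_emod_of_pos (by norm_num), emod_mul_absorb, pow_succ, mul_assoc]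

theorem hit_target (n : Nat) : ∀ (col row : Int), 1 ≤ col → 1 ≤ row →
    idx2 (col, row) = 2 * n → stepPos^[n] (1, 1) = (col, row) := by
  induction n with
  | zero =>
    intro c r hc hr h
    unfold idx2 at h
    simp only at h
    push_cast at h
    have hq : 0 ≤ (c + r - 2) * (c + r - 1) := mul_nonneg (by omega) (by omega)
    have hc1 : c = 1 := by nlinarith
    subst hc1
    have h0 : (r - 1) * r = 0 := by linear_combination h
    have hr1 : r = 1 := by
      rcases mul_eq_zero.mp h0 with h1 | h1 <;> omega
    subst hr1
    simp
  | succ n ih =>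
    intro c r hc hr h
    unfold idx2 at h
    simp only at h
    push_cast at h
    by_cases hc1 : c = 1
    · subst hc1
      have hr2 : 2 ≤ r := by
        by_contra hlt
        have hr1 : r = 1 := by omega
        subst hr1
        norm_num at h
        omega
      have hprev : idx2 (r - 1, 1) = 2 * n := by
        unfold idx2; simp only; linear_combination h
      have := ih (r - 1) 1 (by omega) (by omega) hprev
      rw [Function.iterate_succ_apply', this]
      simp [stepPos]
    · have hc2 : 2 ≤ c := by omega
      have hprev : idx2 (c - 1, r + 1) = 2 * n := by
        unfold idx2; simp only; linear_combination h
      have := ih (c - 1) (r + 1) (by omega) (by omega) hprev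
      rw [Function.iterate_succ_apply', this]
      have hne : (r : Int) + 1 ≠ 1 := by omega
      simp [stepPos, hne]

-- ===== VERDICT (by name: the statement is the Claim_ definition above) =====
theorem code_at_spec : Claim_equal_code_at := by
  intro col row _ hpre
  obtain ⟨hc, hr⟩ := hpre
  unfold Spec_code_at
  -- the index of (col,row)
  have heven : 2 ∣ (col + row - 2) * (col + row - 1) := by
    rcases Int.even_or_odd (col + row) with ⟨t, ht⟩ | ⟨t, ht⟩
    · exact Dvd.dvd.mul_right ⟨t - 1, by omega⟩ _
    · exact Dvd.dvd.mul_left ⟨t, by omega⟩ _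
  obtain ⟨s, hs⟩ := heven
  have hs0 : 0 ≤ s := by nlinarith
  set n : Nat := (s + (col - 1)).toNat with hn
  have hncast : (n : Int) = s + (col - 1) := by rw [hn]; omega
  have hidx : idx2 (col, row) = 2 * n := by
    unfold idx2; simp only; rw [hncast]; omega
  -- A's side
  have hfuel : n ≤ (col + row).toNat * (col + row).toNat := by
    have h2 : ((col + row).toNat : Int) = col + row := by omega
    have h1 : (n : Int) ≤ ((col + row).toNat : Int) * ((col + row).toNat : Int) := by
      rw [h2, hncast]
      nlinarith [sq_nonneg (col + row)]
    exact_mod_cast h1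
  have hA : code_at col row = (20151125 * 252533 ^ n) % 33554393 := by
    unfold code_at
    rw [loop_sim col row n _ 20151125 1 1 hfuel (by norm_num) (by norm_num)
      (hit_target n col row hc hr hidx)]
    exact closed_form n
  -- B's side
  have hB : code_at_alt col row = (20151125 * 252533 ^ n) % 33554393 := by
    unfold code_at_alt
    have hq : PySem.Int.floordiv ((col + row - 2) * (col + row - 1)) 2 = s := by
      rw [PySem.Int.floordiv_eq_ediv_of_pos (by norm_num), hs,
        Int.mul_ediv_cancel_left _ (by norm_num)]
    simp only [hq]
    have : (s + (col - 1)).toNat = n := rfl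
    rw [this, PySem.Int.powMod_eq_emod _ _ (by norm_num),
      PySem.Int.mod_eq_emod_of_pos (by norm_num), emod_mul_absorb']
  rw [hA, hB]
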